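/- GENERATED by farm/mkstatement.py from design/units.tsv (unit `DGifDecompressInput.E`) and the assertions of Gif/Spec/Seg_DGifDecompressInput.lean — do not edit.
   THE STATEMENT of the proof unit `DGifDecompressInput.E`: segment E of `DGifDecompressInput` (9 instructions; entries 0x106874;
   exits ret; ranges 0x106874-0x10688e)
   takes each of its entry assertions to one of its exit assertions (`Gif.Spec.DGifDecompressInput.SegE`), given the contracts of its callees.
   What the names mean: ProgX/Base/Spec/Basic.lean (the shared hypotheses), Gif/Spec/Seg_DGifDecompressInput.lean (the assertions). The theorem to prove:
   `theorem DGifDecompressInput_E_ok : Gif.Spec.DGifDecompressInput_E.Statement`. -/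
import Gif.Code
import Gif.Dec.All
import Gif.Labels
import Gif.Spec.Seg_DGifDecompressInput
namespace Gif.Spec.DGifDecompressInput_E
open X86 X86.User Asan

/-- The statement of unit `DGifDecompressInput.E`. -/
def Statement : Prop :=
  ∀ (Lay : Layout) (_hLay : Lay.hi = 0x1000000) (μ : Microarch) (_hμ : UserX.MicroOK μ) (u₀ : State)
    (_hcode : HasCodeNat Lay u₀ Gif.L.DGifDecompressInput.entry Gif.Code.code_DGifDecompressInput.nat Gif.L.DGifDecompressInput.size),
    Gif.Spec.DGifDecompressInput.SegE Lay μ u₀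

end Gif.Spec.DGifDecompressInput_E
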